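-- pv_equiv track=rewrite | github.com/BhanujaAggarwal/TS-Codes | kapreakar_constant6th.py | iskaprekarconstant
-- ===== SOURCE A (Python) =====
-- def digits_of_given_number(n):
--     digits = [0] * 4;
--     for i in range(4):
--         digits[i] = n % 10
--         n = int(n // 10)
--     return digits
--
-- def maximum_no_formed_by_digits(digits):
--     digits.sort()
--     maximum=0
--     for i in range(3, -1, -1):
--         maximum = maximum * 10 + digits[i]
--     return maximum
--
-- def minimum_no_formed_by_digits(digits):
--     digits.sort()
--     minimum=0
--     for i in range(4):
--         minimum = minimum * 10 + digits[i]
--     return minimum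
--
-- def iskaprekarconstant(n,previous):
--     if (n == 0):
--         return 0
--     previous=n
--     digits = digits_of_given_number(n)
--     difference = abs(maximum_no_formed_by_digits(digits) - minimum_no_formed_by_digits(digits))
--
--     if(difference == previous):
--         return difference
--
--     return iskaprekarconstant(difference,previous)
-- ===== SOURCE B (Python) =====
-- def iskaprekarconstant(n, previous):
--     # Counting-sort the four digits into buckets and build the descending and
--     # ascending arrangements from the buckets; iterate (while loop) to the fixed point.
--     while n != 0:
--         counts = [0] * 10
--         m = n
--         for _ in range(4):
--             counts[m % 10] += 1
--             m = m // 10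
--         maxv = 0
--         for d in range(9, -1, -1):
--             for _ in range(counts[d]):
--                 maxv = maxv * 10 + d
--         minv = 0
--         for d in range(10):
--             for _ in range(counts[d]):
--                 minv = minv * 10 + d
--         diff = abs(maxv - minv)
--         if diff == n:
--             return diff
--         n = diff
--     return 0
-- ===== Notes on version B (the rewrite author's own statement) =====
-- stated objective: alternative
-- what changed: Replaced the tail recursion and the three helper passes (digit-extraction list plus two sort-then-fold passes) by a while loop whose body counting-sorts the four digits into ten buckets and builds the descending and ascending arrangements directly from the buckets, with no sorting and no digit list.
import Mathlib
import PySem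

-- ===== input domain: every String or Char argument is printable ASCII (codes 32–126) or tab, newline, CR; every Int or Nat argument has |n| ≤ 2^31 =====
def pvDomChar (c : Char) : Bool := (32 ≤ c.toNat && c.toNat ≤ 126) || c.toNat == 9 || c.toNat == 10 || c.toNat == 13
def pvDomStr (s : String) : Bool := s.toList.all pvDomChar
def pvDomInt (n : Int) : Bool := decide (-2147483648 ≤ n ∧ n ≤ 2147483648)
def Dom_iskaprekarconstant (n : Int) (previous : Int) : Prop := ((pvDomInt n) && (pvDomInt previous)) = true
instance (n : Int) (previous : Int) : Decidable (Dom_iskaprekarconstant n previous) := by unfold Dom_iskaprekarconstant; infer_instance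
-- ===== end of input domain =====

-- B replaces the tail recursion and the three sort-based digit passes by a while
-- loop that counting-sorts the four digits into ten buckets and builds both
-- arrangements from the buckets; objective: alternative (same cost, no sort).

-- ===== PORT A =====
def digits_of_given_number (n : Int) : List Int :=
  -- digits = [0]*4; for i in range(4): digits[i] = n % 10; n = n // 10
  ((PySem.List.pyRange 0 4 1).foldl
      (fun (st : List Int × Int) i =>
        (PySem.List.pySetD st.1 i (PySem.Int.mod st.2 10), PySem.Int.floordiv st.2 10))
      ([0, 0, 0, 0], n)).1

def maximum_no_formed_by_digits (digits : List Int) : Int :=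
  -- digits.sort(); for i in range(3, -1, -1): maximum = maximum*10 + digits[i]
  -- (A sorts its local list in place; the port sorts a copy — return value unaffected)
  let digits := PySem.List.sorted digits (fun x => x) false
  (PySem.List.pyRange 3 (-1) (-1)).foldl
    (fun maximum i => maximum * 10 + PySem.List.pyGetD digits i 0) 0

def minimum_no_formed_by_digits (digits : List Int) : Int :=
  let digits := PySem.List.sorted digits (fun x => x) false
  (PySem.List.pyRange 0 4 1).foldl
    (fun minimum i => minimum * 10 + PySem.List.pyGetD digits i 0) 0

-- ── A-side termination infrastructure (cited by A's decreasing_by) ──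
-- One Kaprekar step, exactly the `difference` A computes.
def kstep (n : Int) : Int :=
  |maximum_no_formed_by_digits (digits_of_given_number n) -
    minimum_no_formed_by_digits (digits_of_given_number n)|

-- "the routine reaches a fixed point (or 0) within f further steps"
def kreach : Nat → Int → Bool
  | 0, n => n == 0 || kstep n == n
  | f+1, n => n == 0 || kstep n == n || kreach f (kstep n)

-- steps (capped by fuel) until a fixed point or 0
def kfuel : Nat → Int → Nat
  | 0, _ => 0
  | f+1, n => if n = 0 ∨ kstep n = n then 0 else kfuel f (kstep n) + 1

-- the 55 possible values of kstep: 999*e + 90*f with 0 ≤ f ≤ e ≤ 9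
def Simg : List Int :=
  [0, 999, 1089, 1998, 2088, 2178, 2997, 3087, 3177, 3267, 3996, 4086, 4176,
   4266, 4356, 4995, 5085, 5175, 5265, 5355, 5445, 5994, 6084, 6174, 6264,
   6354, 6444, 6534, 6993, 7083, 7173, 7263, 7353, 7443, 7533, 7623, 7992,
   8082, 8172, 8262, 8352, 8442, 8532, 8622, 8712, 8991, 9081, 9171, 9261,
   9351, 9441, 9531, 9621, 9711, 9801]

def kmu (n : Int) : Nat := if n ∈ Simg then kfuel 7 n else 8

theorem dg_eq (n : Int) : digits_of_given_number n =
    [PySem.Int.mod n 10,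
     PySem.Int.mod (PySem.Int.floordiv n 10) 10,
     PySem.Int.mod (PySem.Int.floordiv (PySem.Int.floordiv n 10) 10) 10,
     PySem.Int.mod (PySem.Int.floordiv (PySem.Int.floordiv (PySem.Int.floordiv n 10) 10) 10) 10] := by
  rfl

theorem digits_bounds (n : Int) : ∀ x ∈ digits_of_given_number n, 0 ≤ x ∧ x < 10 := by
  intro x hx
  rw [dg_eq] at hx
  simp only [List.mem_cons, List.not_mem_nil, or_false] at hx
  rcases hx with h | h | h | h <;> rw [h] <;>
    exact ⟨PySem.Int.mod_nonneg _ (by norm_num), PySem.Int.mod_lt _ (by norm_num)⟩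

theorem maxNo_eq (digits : List Int) (s0 s1 s2 s3 : Int)
    (h : PySem.List.sorted digits (fun x => x) false = [s0, s1, s2, s3]) :
    maximum_no_formed_by_digits digits = 1000 * s3 + 100 * s2 + 10 * s1 + s0 := by
  unfold maximum_no_formed_by_digits
  rw [h, show PySem.List.pyRange 3 (-1) (-1) = [3, 2, 1, 0] from by decide]
  simp [pysem]
  ring

theorem minNo_eq (digits : List Int) (s0 s1 s2 s3 : Int)
    (h : PySem.List.sorted digits (fun x => x) false = [s0, s1, s2, s3]) :
    minimum_no_formed_by_digits digits = 1000 * s0 + 100 * s1 + 10 * s2 + s3 := by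
  unfold minimum_no_formed_by_digits
  rw [h, show PySem.List.pyRange 0 4 1 = [0, 1, 2, 3] from by decide]
  simp [pysem]
  ring

-- characterisation of one step through the sorted digits
theorem kstep_char (n : Int) : ∃ s0 s1 s2 s3 : Int,
    PySem.List.sorted (digits_of_given_number n) (fun x => x) false = [s0, s1, s2, s3] ∧
    s0 ≤ s1 ∧ s1 ≤ s2 ∧ s2 ≤ s3 ∧ 0 ≤ s0 ∧ s3 < 10 ∧
    kstep n = 999 * (s3 - s0) + 90 * (s2 - s1) := by
  have hlen : (PySem.List.sorted (digits_of_given_number n) (fun x => x) false).length = 4 := by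
    rw [PySem.List.length_sorted, dg_eq]; rfl
  obtain ⟨s0, s1, s2, s3, hs⟩ : ∃ a b c d, PySem.List.sorted (digits_of_given_number n) (fun x => x) false = [a, b, c, d] := by
    rcases e : PySem.List.sorted (digits_of_given_number n) (fun x => x) false with _ | ⟨a, _ | ⟨b, _ | ⟨c, _ | ⟨d, _ | _⟩⟩⟩⟩ <;>
      rw [e] at hlen <;> simp_all
  have hpw := PySem.List.sorted_pairwise (digits_of_given_number n) (fun x => x)
  rw [hs] at hpw
  simp only [List.pairwise_cons, List.not_mem_nil] at hpw
  have hmem : ∀ x ∈ [s0, s1, s2, s3], 0 ≤ x ∧ x < 10 := by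
    intro x hx
    have hx' : x ∈ digits_of_given_number n :=
      ((PySem.List.sorted_perm (digits_of_given_number n) (fun x => x) false).mem_iff).mp (hs ▸ hx)
    exact digits_bounds n x hx'
  have h01 : s0 ≤ s1 := hpw.1 s1 (by simp)
  have h12 : s1 ≤ s2 := hpw.2.1 s2 (by simp)
  have h23 : s2 ≤ s3 := hpw.2.2.1 s3 (by simp)
  refine ⟨s0, s1, s2, s3, hs, h01, h12, h23, (hmem s0 (by simp)).1, (hmem s3 (by simp)).2, ?_⟩
  · unfold kstep
    rw [maxNo_eq _ _ _ _ _ hs, minNo_eq _ _ _ _ _ hs, abs_of_nonneg (by omega)]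
    ring

theorem mem_Simg_of (e f : Int) (h0 : 0 ≤ f) (h1 : f ≤ e) (h2 : e ≤ 9) :
    999 * e + 90 * f ∈ Simg := by
  have he : 0 ≤ e := h0.trans h1
  interval_cases e <;> interval_cases f <;> decide

theorem kstep_mem (n : Int) : kstep n ∈ Simg := by
  obtain ⟨s0, s1, s2, s3, _, h01, h12, h23, hlo, hhi, hval⟩ := kstep_char n
  rw [hval]
  exact mem_Simg_of _ _ (by omega) (by omega) (by omega)

theorem kfuel_le (f : Nat) (n : Int) : kfuel f n ≤ f := by
  induction f generalizing n with
  | zero => simp [kfuel]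
  | succ f ih => simp only [kfuel]; split <;> [omega; exact Nat.succ_le_succ (ih _)]

theorem kfuel_stable (f : Nat) (n : Int) (h : kreach f n = true) :
    kfuel (f + 1) n = kfuel f n := by
  induction f generalizing n with
  | zero =>
    simp only [kreach, Bool.or_eq_true, beq_iff_eq] at h
    simp [kfuel, h]
  | succ f ih =>
    simp only [kreach, Bool.or_eq_true, beq_iff_eq] at h
    by_cases hfix : n = 0 ∨ kstep n = n
    · simp [kfuel, hfix]
    · have hr : kreach f (kstep n) = true := by tauto
      have e1 : kfuel (f + 1 + 1) n = kfuel (f + 1) (kstep n) + 1 := by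
        rw [kfuel, if_neg hfix]
      have e2 : kfuel (f + 1) n = kfuel f (kstep n) + 1 := by
        rw [kfuel, if_neg hfix]
      rw [e1, e2, ih _ hr]

set_option maxRecDepth 10000 in
theorem Simg_reach : Simg.all (kreach 6) = true := by decide

theorem kmu_lt (n : Int) (h0 : n ≠ 0) (hne : kstep n ≠ n) : kmu (kstep n) < kmu n := by
  have hmem : kstep n ∈ Simg := kstep_mem n
  have hr : kreach 6 (kstep n) = true := by
    have := Simg_reach
    rw [List.all_eq_true] at this
    exact this _ hmem
  have hst : kfuel 7 (kstep n) = kfuel 6 (kstep n) := kfuel_stable 6 _ hr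
  unfold kmu
  rw [if_pos hmem]
  split
  · rw [hst]
    have : kfuel 7 n = kfuel 6 (kstep n) + 1 := by
      simp [kfuel, h0, hne]
    omega
  · have := kfuel_le 7 (kstep n)
    omega

def iskaprekarconstant (n : Int) (previous : Int) : Int :=
  if n == 0 then 0
  else
    let previous := n
    let digits := digits_of_given_number n
    let difference := |maximum_no_formed_by_digits digits - minimum_no_formed_by_digits digits|
    if difference == previous then difference
    else iskaprekarconstant difference previous
termination_by kmu n
decreasing_by
  exact kmu_lt n (by simpa using ‹¬(n == 0) = true›) (by simpa [kstep] using ‹¬(difference == previous) = true›)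

-- ===== PORT B =====
-- counts = [0]*10; for _ in range(4): counts[m % 10] += 1; m = m // 10
def altCounts (n : Int) : List Int :=
  ((PySem.List.pyRange 0 4 1).foldl
      (fun (st : List Int × Int) _ =>
        (PySem.List.pySetD st.1 (PySem.Int.mod st.2 10)
           (PySem.List.pyGetD st.1 (PySem.Int.mod st.2 10) 0 + 1),
         PySem.Int.floordiv st.2 10))
      ([0,0,0,0,0,0,0,0,0,0], n)).1

-- maxv = 0; for d in range(9, -1, -1): for _ in range(counts[d]): maxv = maxv*10 + d
def altMaxv (counts : List Int) : Int :=
  (PySem.List.pyRange 9 (-1) (-1)).foldl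
    (fun maxv d =>
      (PySem.List.pyRange 0 (PySem.List.pyGetD counts d 0) 1).foldl
        (fun m _ => m * 10 + d) maxv) 0

-- minv = 0; for d in range(10): for _ in range(counts[d]): minv = minv*10 + d
def altMinv (counts : List Int) : Int :=
  (PySem.List.pyRange 0 10 1).foldl
    (fun minv d =>
      (PySem.List.pyRange 0 (PySem.List.pyGetD counts d 0) 1).foldl
        (fun m _ => m * 10 + d) minv) 0

-- one iteration of B's while-loop body: diff = abs(maxv - minv)
def bstep (n : Int) : Int := |altMaxv (altCounts n) - altMinv (altCounts n)|

-- ── B-side correctness of the counting-sort step (cited by B's decreasing_by) ──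
-- the four digit values B's counting loop visits
def bdigits (n : Int) : List Int :=
  [PySem.Int.mod n 10,
   PySem.Int.mod (PySem.Int.floordiv n 10) 10,
   PySem.Int.mod (PySem.Int.floordiv (PySem.Int.floordiv n 10) 10) 10,
   PySem.Int.mod (PySem.Int.floordiv (PySem.Int.floordiv (PySem.Int.floordiv n 10) 10) 10) 10]

def cupd (l : List Int) (e : Int) : List Int :=
  PySem.List.pySetD l e (PySem.List.pyGetD l e 0 + 1)

theorem bdigits_bounds (n : Int) : ∀ x ∈ bdigits n, 0 ≤ x ∧ x < 10 := by
  intro x hx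
  simp only [bdigits, List.mem_cons, List.not_mem_nil, or_false] at hx
  rcases hx with h | h | h | h <;> rw [h] <;>
    exact ⟨PySem.Int.mod_nonneg _ (by norm_num), PySem.Int.mod_lt _ (by norm_num)⟩

theorem altCounts_eq (n : Int) : altCounts n =
    cupd (cupd (cupd (cupd [0,0,0,0,0,0,0,0,0,0] (PySem.Int.mod n 10))
        (PySem.Int.mod (PySem.Int.floordiv n 10) 10))
        (PySem.Int.mod (PySem.Int.floordiv (PySem.Int.floordiv n 10) 10) 10))
        (PySem.Int.mod (PySem.Int.floordiv (PySem.Int.floordiv (PySem.Int.floordiv n 10) 10) 10) 10) := by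
  rfl

theorem cupd_length (l : List Int) (e : Int) : (cupd l e).length = l.length := by
  simp [cupd, PySem.List.length_pySetD]

theorem cupd_get (l : List Int) (e d : Int) (he0 : 0 ≤ e) (he1 : e < 10)
    (hd0 : 0 ≤ d) (hd1 : d < 10) (hl : l.length = 10) :
    PySem.List.pyGetD (cupd l e) d 0 =
      PySem.List.pyGetD l d 0 + (if d = e then 1 else 0) := by
  have hset : cupd l e = l.set e.toNat (PySem.List.pyGetD l e 0 + 1) := by
    rw [cupd, PySem.List.pySetD_of_nonneg _ _ he0]
  rw [hset]
  rw [PySem.List.pyGetD_eq_getElem _ _ hd0 (by simp [hl]; omega),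
      PySem.List.pyGetD_eq_getElem _ _ hd0 (by rw [hl]; push_cast; omega)]
  rw [List.getElem_set]
  by_cases h : d = e
  · subst h
    rw [PySem.List.pyGetD_eq_getElem _ _ hd0 (by rw [hl]; push_cast; omega)]
    simp
  · have hne : e.toNat ≠ d.toNat := by omega
    simp [hne, h]

theorem counts_tail (e0 e1 e2 e3 d : Int) :
    (0:Int) + (if d = e0 then 1 else 0) + (if d = e1 then 1 else 0) + (if d = e2 then 1 else 0) + (if d = e3 then 1 else 0)
      = (([e0,e1,e2,e3] : List Int).count d : Int) := by
  simp only [List.count_cons, List.count_nil, beq_iff_eq]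
  simp only [Nat.cast_add, Nat.cast_ite, Nat.cast_one, Nat.cast_zero, @eq_comm Int d]
  ring

theorem counts_spec (n : Int) (d : Int) (hd0 : 0 ≤ d) (hd1 : d < 10) :
    PySem.List.pyGetD (altCounts n) d 0 = ((bdigits n).count d : Int) := by
  have hb : ∀ m : Int, 0 ≤ PySem.Int.mod m 10 ∧ PySem.Int.mod m 10 < 10 :=
    fun m => ⟨PySem.Int.mod_nonneg _ (by norm_num), PySem.Int.mod_lt _ (by norm_num)⟩
  rw [altCounts_eq, bdigits]
  rw [cupd_get _ _ _ (hb _).1 (hb _).2 hd0 hd1 (by simp [cupd_length])]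
  rw [cupd_get _ _ _ (hb _).1 (hb _).2 hd0 hd1 (by simp [cupd_length])]
  rw [cupd_get _ _ _ (hb _).1 (hb _).2 hd0 hd1 (by simp [cupd_length])]
  rw [cupd_get _ _ _ (hb _).1 (hb _).2 hd0 hd1 (by rfl)]
  have hbase : PySem.List.pyGetD ([0,0,0,0,0,0,0,0,0,0] : List Int) d 0 = 0 := by
    interval_cases d <;> rfl
  rw [hbase]
  exact counts_tail _ _ _ _ d

-- the list the bucket loops traverse
def ascOf (xs : List Int) : List Int :=
  ([0,1,2,3,4,5,6,7,8,9] : List Int).flatMap (fun d => List.replicate (xs.count d) d)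

theorem asc_range (xs : List Int) (a : Int) (h1 : 0 ≤ a) (h2 : a < 10) :
    (if (0:Int) = a then xs.count 0 else 0) + ((if (1:Int) = a then xs.count 1 else 0) +
    ((if (2:Int) = a then xs.count 2 else 0) + ((if (3:Int) = a then xs.count 3 else 0) +
    ((if (4:Int) = a then xs.count 4 else 0) + ((if (5:Int) = a then xs.count 5 else 0) +
    ((if (6:Int) = a then xs.count 6 else 0) + ((if (7:Int) = a then xs.count 7 else 0) +
    ((if (8:Int) = a then xs.count 8 else 0) + (if (9:Int) = a then xs.count 9 else 0))))))))) = xs.count a := by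
  interval_cases a <;> norm_num

theorem asc_perm (xs : List Int) (hx : ∀ x ∈ xs, 0 ≤ x ∧ x < 10) : (ascOf xs).Perm xs := by
  rw [List.perm_iff_count]
  intro a
  simp only [ascOf, List.flatMap_cons, List.flatMap_nil, List.append_nil,
    List.count_append, List.count_replicate, beq_iff_eq]
  by_cases ha : 0 ≤ a ∧ a < 10
  · exact asc_range xs a ha.1 ha.2
  · have h0 : xs.count a = 0 := List.count_eq_zero.mpr (fun h => by have := hx a h; omega)
    rw [if_neg (by omega), if_neg (by omega), if_neg (by omega), if_neg (by omega),
        if_neg (by omega), if_neg (by omega), if_neg (by omega), if_neg (by omega),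
        if_neg (by omega), if_neg (by omega), h0]

theorem asc_pairwise (xs : List Int) : (ascOf xs).Pairwise (· ≤ ·) := by
  rw [ascOf, List.pairwise_flatMap]
  refine ⟨fun a _ => List.pairwise_replicate_of_refl, ?_⟩
  refine (show List.Pairwise (fun a b : Int => a ≤ b) [0,1,2,3,4,5,6,7,8,9] from by decide).imp_of_mem ?_
  intro a b _ _ hab x hx y hy
  rw [List.eq_of_mem_replicate hx, List.eq_of_mem_replicate hy]
  exact hab

theorem asc_eq_sorted (xs : List Int) (hx : ∀ x ∈ xs, 0 ≤ x ∧ x < 10) :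
    PySem.List.sorted xs (fun x => x) false = ascOf xs :=
  PySem.List.sorted_id_eq_of_perm_of_pairwise xs (ascOf xs) (asc_perm xs hx) (asc_pairwise xs)

theorem repfold (d c acc : Int) :
    (PySem.List.pyRange 0 c 1).foldl (fun m _ => m * 10 + d) acc
      = (List.replicate c.toNat d).foldl (fun m x => m * 10 + x) acc := by
  have aux : ∀ (L : List Int) (acc : Int), L.foldl (fun m _ => m * 10 + d) acc
      = (List.replicate L.length d).foldl (fun m x => m * 10 + x) acc := by
    intro L
    induction L with
    | nil => intro acc; rfl
    | cons x L ih => intro acc; simp only [List.foldl_cons, List.length_cons, List.replicate_succ, ih]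
  rw [aux]
  congr 1
  rw [PySem.List.length_pyRange_one]
  norm_num

theorem altMinv_eq (n : Int) :
    altMinv (altCounts n) = (ascOf (bdigits n)).foldl (fun m x => m * 10 + x) 0 := by
  rw [altMinv, show PySem.List.pyRange 0 10 1 = [0,1,2,3,4,5,6,7,8,9] from by decide]
  simp only [List.foldl_cons, List.foldl_nil]
  rw [counts_spec n 0 (by norm_num) (by norm_num), counts_spec n 1 (by norm_num) (by norm_num),
      counts_spec n 2 (by norm_num) (by norm_num), counts_spec n 3 (by norm_num) (by norm_num),
      counts_spec n 4 (by norm_num) (by norm_num), counts_spec n 5 (by norm_num) (by norm_num),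
      counts_spec n 6 (by norm_num) (by norm_num), counts_spec n 7 (by norm_num) (by norm_num),
      counts_spec n 8 (by norm_num) (by norm_num), counts_spec n 9 (by norm_num) (by norm_num)]
  simp only [repfold, Int.toNat_natCast, ascOf, List.flatMap_cons, List.flatMap_nil,
    List.append_nil, List.foldl_append]

theorem altMaxv_eq (n : Int) :
    altMaxv (altCounts n) = ((ascOf (bdigits n)).reverse).foldl (fun m x => m * 10 + x) 0 := by
  rw [altMaxv, show PySem.List.pyRange 9 (-1) (-1) = [9,8,7,6,5,4,3,2,1,0] from by decide]
  simp only [List.foldl_cons, List.foldl_nil]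
  rw [counts_spec n 0 (by norm_num) (by norm_num), counts_spec n 1 (by norm_num) (by norm_num),
      counts_spec n 2 (by norm_num) (by norm_num), counts_spec n 3 (by norm_num) (by norm_num),
      counts_spec n 4 (by norm_num) (by norm_num), counts_spec n 5 (by norm_num) (by norm_num),
      counts_spec n 6 (by norm_num) (by norm_num), counts_spec n 7 (by norm_num) (by norm_num),
      counts_spec n 8 (by norm_num) (by norm_num), counts_spec n 9 (by norm_num) (by norm_num)]
  simp only [repfold, Int.toNat_natCast, ascOf, List.flatMap_cons, List.flatMap_nil,
    List.append_nil, List.reverse_append, List.reverse_replicate,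
    List.foldl_append, List.nil_append, List.append_assoc]

-- characterisation of one B step through the sorted digits
theorem bstep_char (n : Int) : ∃ s0 s1 s2 s3 : Int,
    PySem.List.sorted (bdigits n) (fun x => x) false = [s0, s1, s2, s3] ∧
    s0 ≤ s1 ∧ s1 ≤ s2 ∧ s2 ≤ s3 ∧ 0 ≤ s0 ∧ s3 < 10 ∧
    bstep n = 999 * (s3 - s0) + 90 * (s2 - s1) := by
  have hlen : (PySem.List.sorted (bdigits n) (fun x => x) false).length = 4 := by
    rw [PySem.List.length_sorted]; rfl
  obtain ⟨s0, s1, s2, s3, hs⟩ : ∃ a b c d, PySem.List.sorted (bdigits n) (fun x => x) false = [a, b, c, d] := by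
    rcases e : PySem.List.sorted (bdigits n) (fun x => x) false with _ | ⟨a, _ | ⟨b, _ | ⟨c, _ | ⟨d, _ | _⟩⟩⟩⟩ <;>
      rw [e] at hlen <;> simp_all
  have hpw := PySem.List.sorted_pairwise (bdigits n) (fun x => x)
  rw [hs] at hpw
  simp only [List.pairwise_cons, List.not_mem_nil] at hpw
  have hmem : ∀ x ∈ [s0, s1, s2, s3], 0 ≤ x ∧ x < 10 := by
    intro x hx
    have hx' : x ∈ bdigits n :=
      ((PySem.List.sorted_perm (bdigits n) (fun x => x) false).mem_iff).mp (hs ▸ hx)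
    exact bdigits_bounds n x hx'
  have h01 : s0 ≤ s1 := hpw.1 s1 (by simp)
  have h12 : s1 ≤ s2 := hpw.2.1 s2 (by simp)
  have h23 : s2 ≤ s3 := hpw.2.2.1 s3 (by simp)
  refine ⟨s0, s1, s2, s3, hs, h01, h12, h23, (hmem s0 (by simp)).1, (hmem s3 (by simp)).2, ?_⟩
  · have hasc : ascOf (bdigits n) = [s0, s1, s2, s3] := by
      rw [← asc_eq_sorted _ (bdigits_bounds n), hs]
    rw [bstep, altMaxv_eq, altMinv_eq, hasc]
    simp only [List.reverse_cons, List.reverse_nil, List.nil_append, List.cons_append,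
      List.foldl_cons, List.foldl_nil]
    rw [abs_of_nonneg (by omega)]
    omega

-- ── B-side termination infrastructure (cited by B's decreasing_by) ──
-- the possible values of bstep: 999*e + 90*f with 0 ≤ f ≤ e ≤ 9
def Bimg : List Int :=
  (List.range 10).flatMap (fun e => (List.range (e + 1)).map (fun f => (999 * (e : Int) + 90 * (f : Int))))

-- "B's loop reaches a fixed point (or 0) within f further iterations"
def breach : Nat → Int → Bool
  | 0, n => n == 0 || bstep n == n
  | f+1, n => n == 0 || bstep n == n || breach f (bstep n)

-- iterations (capped by fuel) until a fixed point or 0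
def bfuel : Nat → Int → Nat
  | 0, _ => 0
  | f+1, n => if n = 0 ∨ bstep n = n then 0 else bfuel f (bstep n) + 1

def bmu (n : Int) : Nat := if n ∈ Bimg then bfuel 7 n else 8

theorem mem_Bimg_of (e f : Int) (h0 : 0 ≤ f) (h1 : f ≤ e) (h2 : e ≤ 9) :
    999 * e + 90 * f ∈ Bimg := by
  have he : 0 ≤ e := h0.trans h1
  interval_cases e <;> interval_cases f <;> decide

theorem bstep_mem (n : Int) : bstep n ∈ Bimg := by
  obtain ⟨s0, s1, s2, s3, _, h01, h12, h23, hlo, hhi, hval⟩ := bstep_char n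
  rw [hval]
  exact mem_Bimg_of _ _ (by omega) (by omega) (by omega)

theorem bfuel_le (f : Nat) (n : Int) : bfuel f n ≤ f := by
  induction f generalizing n with
  | zero => simp [bfuel]
  | succ f ih => simp only [bfuel]; split <;> [omega; exact Nat.succ_le_succ (ih _)]

theorem bfuel_stable (f : Nat) (n : Int) (h : breach f n = true) :
    bfuel (f + 1) n = bfuel f n := by
  induction f generalizing n with
  | zero =>
    simp only [breach, Bool.or_eq_true, beq_iff_eq] at h
    simp [bfuel, h]
  | succ f ih =>
    simp only [breach, Bool.or_eq_true, beq_iff_eq] at h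
    by_cases hfix : n = 0 ∨ bstep n = n
    · simp [bfuel, hfix]
    · have hr : breach f (bstep n) = true := by tauto
      have e1 : bfuel (f + 1 + 1) n = bfuel (f + 1) (bstep n) + 1 := by
        rw [bfuel, if_neg hfix]
      have e2 : bfuel (f + 1) n = bfuel f (bstep n) + 1 := by
        rw [bfuel, if_neg hfix]
      rw [e1, e2, ih _ hr]

set_option maxRecDepth 10000 in
theorem Bimg_reach : Bimg.all (breach 6) = true := by decide

theorem bmu_lt (n : Int) (h0 : n ≠ 0) (hne : bstep n ≠ n) : bmu (bstep n) < bmu n := by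
  have hmem : bstep n ∈ Bimg := bstep_mem n
  have hr : breach 6 (bstep n) = true := by
    have := Bimg_reach
    rw [List.all_eq_true] at this
    exact this _ hmem
  have hst : bfuel 7 (bstep n) = bfuel 6 (bstep n) := bfuel_stable 6 _ hr
  unfold bmu
  rw [if_pos hmem]
  split
  · rw [hst]
    have : bfuel 7 n = bfuel 6 (bstep n) + 1 := by
      simp [bfuel, h0, hne]
    omega
  · have := bfuel_le 7 (bstep n)
    omega

def iskaprekarconstant_alt (n : Int) (previous : Int) : Int :=
  -- while n != 0: … return inside the loop; after the loop: return 0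
  if n ≠ 0 then
    let counts := altCounts n
    let maxv := altMaxv counts
    let minv := altMinv counts
    let diff := |maxv - minv|
    if diff == n then diff
    else iskaprekarconstant_alt diff previous
  else 0
termination_by bmu n
decreasing_by
  exact bmu_lt n (by assumption) (by simpa [bstep] using ‹¬(diff == n) = true›)

-- ===== PRECONDITION & SPEC =====
def Spec_iskaprekarconstant (n : Int) (previous : Int) (out : Int) : Prop := out = iskaprekarconstant_alt n previous
instance (n : Int) (previous : Int) (out : Int) : Decidable (Spec_iskaprekarconstant n previous out) := by unfold Spec_iskaprekarconstant; infer_instance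

-- ===== CLAIM (what is proved, stated in full; the proofs are below) =====
def Claim_equal_iskaprekarconstant : Prop := ∀ (n : Int) (previous : Int), Dom_iskaprekarconstant n previous → Spec_iskaprekarconstant n previous (iskaprekarconstant n previous)

-- ===== LEMMAS AND PROOFS =====
-- A computes its difference from the same four digit values B buckets
theorem bstep_eq_kstep (n : Int) : bstep n = kstep n := by
  obtain ⟨s0, s1, s2, s3, hs, h01, h12, h23, hlo, hhi, hval⟩ := bstep_char n
  have hs' : PySem.List.sorted (digits_of_given_number n) (fun x => x) false = [s0, s1, s2, s3] := by
    rw [dg_eq]; exact hs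
  rw [hval, kstep, maxNo_eq _ _ _ _ _ hs', minNo_eq _ _ _ _ _ hs', abs_of_nonneg (by omega)]
  ring

theorem a_step (n p : Int) (h0 : n ≠ 0) : iskaprekarconstant n p =
    (if kstep n = n then kstep n else iskaprekarconstant (kstep n) n) := by
  rw [iskaprekarconstant, if_neg (by simpa using h0)]
  show (if (kstep n == n) = true then kstep n else iskaprekarconstant (kstep n) n) = _
  by_cases hfix : kstep n = n <;> simp [hfix]

theorem alt_step (n p : Int) (h0 : n ≠ 0) : iskaprekarconstant_alt n p =
    (if kstep n = n then kstep n else iskaprekarconstant_alt (kstep n) p) := by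
  rw [iskaprekarconstant_alt, if_pos h0]
  show (if (bstep n == n) = true then bstep n else iskaprekarconstant_alt (bstep n) p) = _
  rw [bstep_eq_kstep]
  by_cases hfix : kstep n = n <;> simp [hfix]

theorem agree (n p q : Int) : iskaprekarconstant n p = iskaprekarconstant_alt n q := by
  by_cases h0 : n = 0
  · rw [iskaprekarconstant, iskaprekarconstant_alt]; simp [h0]
  · rw [a_step n p h0, alt_step n q h0]
    by_cases hfix : kstep n = n
    · simp [hfix]
    · rw [if_neg hfix, if_neg hfix]
      exact agree (kstep n) n q
termination_by kmu n
decreasing_by exact kmu_lt n h0 hfix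

-- ===== VERDICT (by name: the statement is the Claim_ definition above) =====
theorem iskaprekarconstant_spec : Claim_equal_iskaprekarconstant := by
  intro n previous _
  unfold Spec_iskaprekarconstant
  exact agree n previous previous
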